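-- pv_equiv track=rewrite | github.com/soomkim00/Python-practice-2022 | 5.2/2153.py | convert
-- ===== SOURCE A (Python) =====
-- def convert(m):
--     num = 0
--     for i in m:
--         if ord('a') <= ord(i) <= ord('z'):
--             num += ord(i) - 96
--         elif ord('A') <= ord(i) <= ord('Z'):
--             num += ord(i) - 38
--     return num
-- ===== SOURCE B (Python) =====
-- def convert(m):
--     counts = {}
--     for c in m:
--         counts[c] = counts.get(c, 0) + 1
--     num = 0
--     for i in range(26):
--         num += (i + 1) * counts.get(chr(97 + i), 0)
--         num += (i + 27) * counts.get(chr(65 + i), 0)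
--     return num
-- ===== Notes on version B (the rewrite author's own statement) =====
-- stated objective: alternative
-- what changed: Replaces A's single scan with arithmetic range branches per character by a two-stage histogram algorithm: one pass builds a character-count dict, then a loop over the 26 alphabet positions sums value*count for the lower- and uppercase letter at each position.
import Mathlib
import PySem

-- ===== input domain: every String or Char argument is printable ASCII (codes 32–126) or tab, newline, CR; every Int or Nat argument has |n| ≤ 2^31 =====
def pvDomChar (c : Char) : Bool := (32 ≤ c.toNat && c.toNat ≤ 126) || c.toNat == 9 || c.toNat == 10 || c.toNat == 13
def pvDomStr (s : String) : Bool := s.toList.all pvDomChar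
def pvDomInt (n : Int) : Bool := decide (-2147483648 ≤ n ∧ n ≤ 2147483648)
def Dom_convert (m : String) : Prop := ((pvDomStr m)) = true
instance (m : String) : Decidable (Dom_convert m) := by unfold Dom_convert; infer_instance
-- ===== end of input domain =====

-- B replaces A's single branch-per-character scan with a two-stage histogram algorithm: build a character-count dict, then loop over the 26 alphabet positions multiplying counts by values (alternative decomposition, same cost).


-- ===== PORT A =====
-- Port of A: one fold over the characters with A's two range-checked branches.
def convert (m : String) : Int :=
  m.toList.foldl (fun num i =>
    if 97 ≤ i.toNat ∧ i.toNat ≤ 122 then num + ((i.toNat : Int) - 96)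
    else if 65 ≤ i.toNat ∧ i.toNat ≤ 90 then num + ((i.toNat : Int) - 38)
    else num) 0

-- ===== PORT B =====
-- Port of B: first pass builds the histogram dict, second pass loops over the alphabet.
def convert_alt (m : String) : Int :=
  let counts : PySem.Dict Char Int :=
    m.toList.foldl (fun d c => d.insert c (d.getD c 0 + 1)) PySem.Dict.empty
  (PySem.List.pyRange 0 26 1).foldl (fun num i =>
    num + (i + 1) * counts.getD (Char.ofNat (97 + i).toNat) 0
        + (i + 27) * counts.getD (Char.ofNat (65 + i).toNat) 0) 0

-- ===== PRECONDITION & SPEC =====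
def Spec_convert (m : String) (out : Int) : Prop := out = convert_alt m
instance (m : String) (out : Int) : Decidable (Spec_convert m out) := by unfold Spec_convert; infer_instance

-- ===== CLAIM (what is proved, stated in full; the proofs are below) =====
def Claim_equal_convert : Prop := ∀ (m : String), Dom_convert m → Spec_convert m (convert m)

-- ===== LEMMAS AND PROOFS =====

-- A's per-character value.
def aVal (c : Char) : Int :=
  if 97 ≤ c.toNat ∧ c.toNat ≤ 122 then (c.toNat : Int) - 96
  else if 65 ≤ c.toNat ∧ c.toNat ≤ 90 then (c.toNat : Int) - 38
  else 0

-- B's alphabet-loop total expressed over raw letter counts of a char list.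
def bVal (l : List Char) : Int :=
  (PySem.List.pyRange 0 26 1).foldl (fun num i =>
    num + (i + 1) * (l.count (Char.ofNat (97 + i).toNat) : Int)
        + (i + 27) * (l.count (Char.ofNat (65 + i).toNat) : Int)) 0

theorem pyRange26 : PySem.List.pyRange 0 26 1 =
    [0,1,2,3,4,5,6,7,8,9,10,11,12,13,14,15,16,17,18,19,20,21,22,23,24,25] := by
  decide

-- bVal is additive because letter counts are.
theorem bVal_append (l₁ l₂ : List Char) : bVal (l₁ ++ l₂) = bVal l₁ + bVal l₂ := by
  simp only [bVal, pyRange26, List.foldl, List.count_append]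
  push_cast
  ring

-- On any ASCII char, B's alphabet loop applied to the singleton gives A's value.
set_option maxRecDepth 8000 in
theorem bVal_singleton (n : Nat) (h : n < 127) :
    bVal [Char.ofNat n] = aVal (Char.ofNat n) := by
  revert h; revert n; decide

theorem bVal_eq_sum (l : List Char) (hl : l.all pvDomChar = true) :
    bVal l = (l.map aVal).sum := by
  induction l with
  | nil => decide
  | cons c t ih =>
    simp only [List.all_cons, Bool.and_eq_true] at hl
    have hc : c.toNat < 127 := by
      have := hl.1; simp [pvDomChar] at this; omega
    have h1 : bVal (c :: t) = bVal [c] + bVal t := bVal_append [c] t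
    have h2 : bVal [c] = aVal c := by
      have := bVal_singleton c.toNat hc
      rwa [Char.ofNat_toNat] at this
    simp [h1, h2, ih hl.2]

-- A's fold equals the sum of per-character values.
theorem convert_fold (l : List Char) (num : Int) :
    l.foldl (fun num i =>
      if 97 ≤ i.toNat ∧ i.toNat ≤ 122 then num + ((i.toNat : Int) - 96)
      else if 65 ≤ i.toNat ∧ i.toNat ≤ 90 then num + ((i.toNat : Int) - 38)
      else num) num = num + (l.map aVal).sum := by
  induction l generalizing num with
  | nil => simp
  | cons c t ih =>
    simp only [List.foldl_cons, List.map_cons, List.sum_cons, ih, aVal]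
    split_ifs <;> ring

-- B's histogram getD equals the raw letter count.
theorem convert_alt_eq_bVal (m : String) : convert_alt m = bVal m.toList := by
  simp only [convert_alt, bVal, pyRange26, List.foldl,
    PySem.Dict.getD_foldl_insert_add_one]
  simp [PySem.Dict.getD]

-- ===== VERDICT (by name: the statement is the Claim_ definition above) =====
theorem convert_spec : Claim_equal_convert := by
  intro m hdom
  unfold Spec_convert convert
  rw [convert_alt_eq_bVal, bVal_eq_sum m.toList hdom, convert_fold]
  simp
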